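-- pv_equiv track=rewrite | github.com/ayoung0073/Algorithm | programmers/문자열압축.py | solution
-- ===== SOURCE A (Python) =====
-- def solution(s): # 입력받은 문자열 s
--     # before
--     result = length = len(s)
--     cnt = 0
--     before = ''
--     for i in range(1, length // 2 + 1):
--         arr = [s[j:j+i] for j in range(0, length, i)] # i의 길이단위로 문자열 자르기
--         string = '' # i의 길이 단위로 잘라 압축했을 때의 결과값 저장
--         before = '' # 이전 문자열 저장
--         cnt = 0 # 동일 문자열 세는 변수 0으로 초기화
--         for k in arr:
--             if before == k: # 이전 문자열과 동일한 경우
--                 cnt += 1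
--             else: # 동일하지 않을 경우 경우 3가지로 나뉨
--                 if cnt == 0: # 가장 처음 요소인 경우는 cnt = 0
--                     cnt += 1
--                     pass
--                 elif cnt == 1: # before 문자열이 한번 나타난 경우는 1제외하고 문자열만 append
--                     string += before
--                 else:
--                     string += str(cnt) + before
--                     cnt = 1
--
--                 before = k
--
--         # 요소 남은 경우
--         if cnt != 1:
--             string += str(cnt) + before
--         else:
--             string += before
--
--         result = min(result, len(string)) # 반복할 때마다 짧은 길이 갱신
--
--     return result
-- ===== SOURCE B (Python) =====
-- def solution(s):
--     n = len(s)
--     best = n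
--     for i in range(1, n // 2 + 1):
--         full, tail = divmod(n, i)
--         # chunk j equals chunk j+1 iff s matches its own shift by i on that window
--         eq = [all(s[t] == s[t + i] for t in range(j * i, j * i + i))
--               for j in range(full - 1)]
--         bnds = [j + 1 for j, e in enumerate(eq) if not e]
--         total = tail + sum(i + (len(str(b - a)) if b - a > 1 else 0)
--                            for a, b in zip([0] + bnds, bnds + [full]))
--         best = min(best, total)
--     return best
-- ===== Notes on version B (the rewrite author's own statement) =====
-- stated objective: alternative
-- what changed: A slices the string into chunks and runs a before/cnt state machine that concatenates the compressed string and measures it; B never materialises chunks or the compressed string: per size i it compares the string with its own shift by i to get adjacency flags, turns the False positions into a boundary list, and sums widths (i plus digit count of each boundary difference) arithmetically.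
import Mathlib
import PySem

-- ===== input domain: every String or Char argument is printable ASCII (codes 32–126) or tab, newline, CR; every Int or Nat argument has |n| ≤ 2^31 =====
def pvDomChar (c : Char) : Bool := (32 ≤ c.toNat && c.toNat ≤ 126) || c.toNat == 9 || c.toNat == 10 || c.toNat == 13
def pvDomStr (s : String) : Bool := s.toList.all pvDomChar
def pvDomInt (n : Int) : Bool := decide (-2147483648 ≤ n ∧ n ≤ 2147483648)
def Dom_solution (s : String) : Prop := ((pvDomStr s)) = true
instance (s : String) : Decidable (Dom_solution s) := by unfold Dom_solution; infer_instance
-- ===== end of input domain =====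

-- B never materialises the chunk substrings or the compressed string: it compares the string
-- with its own shift by i to find run boundaries and sums the widths arithmetically; objective: alternative.

-- ===== PORT A =====
-- inner-loop body of A: state = (string, before, cnt)
def pvStepA (st : List Char × List Char × Int) (k : List Char) : List Char × List Char × Int :=
  if st.2.1 == k then (st.1, st.2.1, st.2.2 + 1)
  else if st.2.2 == 0 then (st.1, k, st.2.2 + 1)
  else if st.2.2 == 1 then (st.1 ++ st.2.1, k, st.2.2)
  else (st.1 ++ PySem.Int.toChars st.2.2 ++ st.2.1, k, 1)

def solution (s : String) : Int :=
  let cs := s.toList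
  let length : Int := cs.length
  (PySem.List.pyRange 1 (PySem.Int.floordiv length 2 + 1) 1).foldl (fun result i =>
    let arr := (PySem.List.pyRange 0 length i).map (fun j => PySem.List.slice cs (some j) (some (j + i)))
    let fin := arr.foldl pvStepA ([], [], 0)
    let str2 := if fin.2.2 ≠ 1 then fin.1 ++ PySem.Int.toChars fin.2.2 ++ fin.2.1 else fin.1 ++ fin.2.1
    min result (str2.length : Int)) length

-- ===== PORT B =====
def solution_alt (s : String) : Int :=
  let cs := s.toList
  let n : Int := cs.length
  (PySem.List.pyRange 1 (PySem.Int.floordiv n 2 + 1) 1).foldl (fun best i =>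
    let full := PySem.Int.floordiv n i
    let tail := PySem.Int.mod n i
    -- chunk j equals chunk j+1 iff the string matches its own shift by i on that window
    let eq := (PySem.List.pyRange 0 (full - 1) 1).map (fun j =>
      (PySem.List.pyRange (j * i) (j * i + i) 1).all (fun t =>
        PySem.List.pyGet? cs t == PySem.List.pyGet? cs (t + i)))
    let bnds := (PySem.List.enumerate eq).filterMap (fun p => if p.2 then none else some (p.1 + 1))
    let total := tail + (((0 :: bnds).zip (bnds ++ [full])).map (fun p =>
        i + (if p.2 - p.1 > 1 then ((PySem.Int.toChars (p.2 - p.1)).length : Int) else 0))).sum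
    min best total) n

-- ===== PRECONDITION & SPEC =====
def Spec_solution (s : String) (out : Int) : Prop := out = solution_alt s
instance (s : String) (out : Int) : Decidable (Spec_solution s out) := by unfold Spec_solution; infer_instance

-- ===== CLAIM (what is proved, stated in full; the proofs are below) =====
def Claim_equal_solution : Prop := ∀ (s : String), Dom_solution s → Spec_solution s (solution s)

-- ===== LEMMAS AND PROOFS =====

-- length of A's flushed string for a final state
def pvALen (st : List Char × List Char × Int) : Int :=
  (((if st.2.2 ≠ 1 then st.1 ++ PySem.Int.toChars st.2.2 ++ st.2.1 else st.1 ++ st.2.1).length : Nat) : Int)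

-- width a run (chunk b repeated c times) contributes
def pvEmit (b : List Char) (c : Int) : Int :=
  (if c ≠ 1 then ((PySem.Int.toChars c).length : Int) else 0) + b.length

-- A's remaining output length from state (·, b, c)
def pvRunLen (b : List Char) (c : Int) : List (List Char) → Int
  | [] => pvEmit b c
  | k :: ks => if k == b then pvRunLen b (c + 1) ks else pvEmit b c + pvRunLen k 1 ks

-- compressed length of a chunk list (proof-side characterisation shared by both ports)
def pvClen : List (List Char) → Int
  | [] => 0
  | x :: xs =>
    let t := (xs.takeWhile (· == x)).length
    (x.length : Int) + (if (1 + (t : Int)) > 1 then ((PySem.Int.toChars (1 + (t : Int))).length : Int) else 0)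
      + pvClen (xs.drop t)
termination_by l => l.length
decreasing_by simp

-- digit width that a run count contributes
def pvDig (c : Int) : Int := if c > 1 then ((PySem.Int.toChars c).length : Int) else 0

-- run lengths of a boolean adjacency list: (first run, later runs)
def pvRuns : List Bool → Int × List Int
  | [] => (1, [])
  | b :: e => if b then ((pvRuns e).1 + 1, (pvRuns e).2) else (1, (pvRuns e).1 :: (pvRuns e).2)

-- adjacency flags of a chunk list
def pvAdj : List (List Char) → List Bool
  | [] => []
  | [_] => []
  | a :: b :: t => (a == b) :: pvAdj (b :: t)

-- boundary positions of an adjacency list (run starts after position 0)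
def pvBnds : List Bool → List Int
  | [] => []
  | b :: e => (if b then [] else [1]) ++ (pvBnds e).map (· + 1)

-- consecutive differences of a :: l ++ [z]
def pvDiffs : Int → List Int → Int → List Int
  | a, [], z => [z - a]
  | a, b :: l, z => (b - a) :: pvDiffs b l z

lemma pvBnds_true (t : List Bool) : pvBnds (true :: t) = (pvBnds t).map (· + 1) := by
  simp [pvBnds]

lemma pvBnds_false (t : List Bool) : pvBnds (false :: t) = 1 :: (pvBnds t).map (· + 1) := by
  simp [pvBnds]

lemma pvRuns_true (t : List Bool) : pvRuns (true :: t) = ((pvRuns t).1 + 1, (pvRuns t).2) := by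
  simp [pvRuns]

lemma pvRuns_false (t : List Bool) : pvRuns (false :: t) = (1, (pvRuns t).1 :: (pvRuns t).2) := by
  simp [pvRuns]

lemma pvMain (l : List (List Char)) : ∀ (acc b : List Char) (c : Int), 1 ≤ c →
    pvALen (l.foldl pvStepA (acc, b, c)) = acc.length + pvRunLen b c l := by
  induction l with
  | nil =>
    intro acc b c hc
    simp only [List.foldl_nil, pvALen, pvRunLen, pvEmit]
    split_ifs <;> simp
  | cons k ks ih =>
    intro acc b c hc
    simp only [List.foldl_cons, pvRunLen]
    by_cases hbk : b = k
    · have : pvStepA (acc, b, c) k = (acc, b, c + 1) := by simp [pvStepA, hbk]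
      rw [this, ih acc b (c + 1) (by omega)]
      simp [hbk]
    · have hkb : (k == b) = false := by simp; exact fun h => hbk h.symm
      rw [hkb]
      by_cases hc1 : c = 1
      · have : pvStepA (acc, b, c) k = (acc ++ b, k, 1) := by
          simp [pvStepA, hbk, hc1]
        rw [this, ih (acc ++ b) k 1 (by omega)]
        simp [pvEmit, hc1]; ring
      · have : pvStepA (acc, b, c) k = (acc ++ PySem.Int.toChars c ++ b, k, 1) := by
          have : ¬ c = 0 := by omega
          simp [pvStepA, hbk, hc1, this]
        rw [this, ih _ k 1 (by omega)]
        simp [pvEmit, hc1]; ring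

lemma pvClen_nil : pvClen [] = 0 := by rw [pvClen]

lemma pvClen_cons_eq (x : List Char) (xs : List (List Char)) :
    pvClen (x :: xs) = pvEmit x (1 + ((xs.takeWhile (· == x)).length : Int))
      + pvClen (xs.drop (xs.takeWhile (· == x)).length) := by
  rw [pvClen, pvEmit]
  by_cases ht : (xs.takeWhile (· == x)).length = 0
  · simp [ht]
  · have h1 : ¬ ((1 : Int) + ((xs.takeWhile (· == x)).length : Int) = 1) := by omega
    have h2 : (1 : Int) + ((xs.takeWhile (· == x)).length : Int) > 1 := by omega
    simp [h1, h2]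
    ring

lemma pvRunLen_eq (l : List (List Char)) : ∀ (b : List Char) (c : Int), 1 ≤ c →
    pvRunLen b c l = pvEmit b (c + (l.takeWhile (· == b)).length)
      + pvClen (l.drop (l.takeWhile (· == b)).length) := by
  induction l with
  | nil => intro b c hc; simp [pvRunLen, pvClen_nil]
  | cons k ks ih =>
    intro b c hc
    by_cases hkb : k = b
    · have hb : (k == b) = true := by simp [hkb]
      simp only [pvRunLen, hb, if_true, List.takeWhile_cons, List.length_cons, List.drop_succ_cons]
      rw [ih b (c + 1) (by omega)]
      push_cast; ring_nf
    · have hb : (k == b) = false := by simp [hkb]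
      simp only [pvRunLen, hb, List.takeWhile_cons, Bool.false_eq_true, if_false,
        List.length_nil, List.drop_zero, Nat.cast_zero, add_zero]
      rw [ih k 1 (by omega), pvClen_cons_eq]

lemma pvClen_cons (x : List Char) (xs : List (List Char)) :
    pvClen (x :: xs) = pvRunLen x 1 xs := by
  rw [pvRunLen_eq xs x 1 (by omega), pvClen_cons_eq]

lemma pvFirstStep (x : List Char) : pvStepA ([], [], 0) x = ([], x, 1) := by
  by_cases hx : ([] : List Char) = x
  · simp [pvStepA, ← hx]
  · simp [pvStepA, hx]
    exact fun h => hx h.symm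

lemma pvInner (arr : List (List Char)) (h : arr ≠ []) :
    pvALen (arr.foldl pvStepA ([], [], 0)) = pvClen arr := by
  obtain ⟨x, xs, rfl⟩ := List.exists_cons_of_ne_nil h
  rw [List.foldl_cons, pvFirstStep, pvMain xs [] x 1 (by omega), pvClen_cons]
  simp

lemma pvEmit_dig (b : List Char) (c : Int) (hc : 1 ≤ c) :
    pvEmit b c = (b.length : Int) + pvDig c := by
  unfold pvEmit pvDig
  rcases lt_or_ge 1 c with h | h
  · rw [if_pos (by omega), if_pos h]; ring
  · have hc1 : c = 1 := by omega
    subst hc1; simp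

lemma pvRunLen_runs (xs : List (List Char)) : ∀ (x : List Char) (c w : Int), 1 ≤ c →
    (x.length : Int) = w → (∀ z ∈ xs, (z.length : Int) = w) →
    pvRunLen x c xs = (w + pvDig (c - 1 + (pvRuns (pvAdj (x :: xs))).1))
      + (((pvRuns (pvAdj (x :: xs))).2).map (fun d => w + pvDig d)).sum := by
  induction xs with
  | nil =>
    intro x c w hc hx _
    simp only [pvRunLen, pvAdj, pvRuns, List.map_nil, List.sum_nil, add_zero]
    rw [pvEmit_dig _ _ hc, hx]
    congr 2
    ring
  | cons y ys ih =>
    intro x c w hc hx hys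
    have hadj : pvAdj (x :: y :: ys) = (x == y) :: pvAdj (y :: ys) := rfl
    have hyw : (y.length : Int) = w := hys y (by simp)
    have hys' : ∀ z ∈ ys, (z.length : Int) = w := fun z hz => hys z (by simp [hz])
    by_cases hxy : x = y
    · have hb : (y == x) = true := by simp [hxy]
      have hb' : (x == y) = true := by simp [hxy]
      simp only [pvRunLen, hb, if_true]
      subst hxy
      rw [ih x (c + 1) w (by omega) hx hys', hadj, hb', pvRuns_true]
      congr 3
      ring
    · have hb : (y == x) = false := by simp; exact fun h => hxy h.symm
      have hb' : (x == y) = false := by simp [hxy]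
      simp only [pvRunLen, hb, Bool.false_eq_true, if_false]
      rw [ih y 1 w (by omega) hyw hys', hadj, hb', pvRuns_false, pvEmit_dig _ _ hc, hx]
      simp only [List.map_cons, List.sum_cons]
      have e1 : (1 : Int) - 1 + (pvRuns (pvAdj (y :: ys))).1 = (pvRuns (pvAdj (y :: ys))).1 := by ring
      have e2 : c - 1 + 1 = c := by ring
      rw [e1, e2]
lemma pvClen_runs (C : List (List Char)) (w : Int) (hC : C ≠ [])
    (hw : ∀ z ∈ C, (z.length : Int) = w) :
    pvClen C = (((pvRuns (pvAdj C)).1 :: (pvRuns (pvAdj C)).2).map (fun d => w + pvDig d)).sum := by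
  obtain ⟨x, xs, rfl⟩ := List.exists_cons_of_ne_nil hC
  rw [pvClen_cons, pvRunLen_runs xs x 1 w (by omega) (hw x (by simp))
    (fun z hz => hw z (by simp [hz]))]
  simp only [List.map_cons, List.sum_cons]
  have e1 : (1 : Int) - 1 + (pvRuns (pvAdj (x :: xs))).1 = (pvRuns (pvAdj (x :: xs))).1 := by ring
  rw [e1]
lemma pvRunLen_append_tail (xs : List (List Char)) : ∀ (x t : List Char) (c w : Int), 1 ≤ c →
    (x.length : Int) = w → (∀ z ∈ xs, (z.length : Int) = w) → (t.length : Int) ≠ w →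
    pvRunLen x c (xs ++ [t]) = pvRunLen x c xs + t.length := by
  induction xs with
  | nil =>
    intro x t c w _ hx _ ht
    have hb : (t == x) = false := by
      simp only [beq_eq_false_iff_ne, ne_eq]
      intro h; subst h; exact ht hx
    simp only [List.nil_append, pvRunLen, hb, Bool.false_eq_true, if_false]
    have : pvEmit t 1 = (t.length : Int) := by simp [pvEmit]
    rw [this]
  | cons y ys ih =>
    intro x t c w hc hx hys ht
    have hyw : (y.length : Int) = w := hys y (by simp)
    have hys' : ∀ z ∈ ys, (z.length : Int) = w := fun z hz => hys z (by simp [hz])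
    simp only [List.cons_append, pvRunLen]
    cases hb : (y == x) with
    | true =>
      simp only [if_true]
      rw [ih x t (c + 1) w (by omega) hx hys' ht]
    | false =>
      simp only [Bool.false_eq_true, if_false]
      rw [ih y t 1 w (by omega) hyw hys' ht]
      ring
lemma pvClen_append_tail (C : List (List Char)) (t : List Char) (w : Int) (hC : C ≠ [])
    (hw : ∀ z ∈ C, (z.length : Int) = w) (ht : (t.length : Int) ≠ w) :
    pvClen (C ++ [t]) = pvClen C + t.length := by
  obtain ⟨x, xs, rfl⟩ := List.exists_cons_of_ne_nil hC
  rw [List.cons_append, pvClen_cons, pvClen_cons,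
    pvRunLen_append_tail xs x t 1 w (by omega) (hw x (by simp)) (fun z hz => hw z (by simp [hz])) ht]
lemma pvAdj_map_range (m : Nat) : ∀ (f : Nat → List Char),
    pvAdj ((List.range (m + 1)).map f) = (List.range m).map (fun j => f j == f (j + 1)) := by
  induction m with
  | zero => intro f; simp [pvAdj]
  | succ m ih =>
    intro f
    have e1 : (List.range (m + 1 + 1)).map f = f 0 :: (List.range (m + 1)).map (fun k => f (k + 1)) := by
      rw [List.range_succ_eq_map, List.map_cons, List.map_map]; rfl
    have e2 : (List.range (m + 1)).map (fun k => f (k + 1))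
        = f 1 :: (List.range m).map (fun k => f (k + 2)) := by
      rw [List.range_succ_eq_map, List.map_cons, List.map_map]; rfl
    have e3 : (List.range (m + 1)).map (fun j => f j == f (j + 1))
        = (f 0 == f 1) :: (List.range m).map (fun j => f (j + 1) == f (j + 2)) := by
      rw [List.range_succ_eq_map, List.map_cons, List.map_map]; rfl
    rw [e1, e2, e3]
    have e4 : pvAdj (f 0 :: f 1 :: (List.range m).map (fun k => f (k + 2)))
        = (f 0 == f 1) :: pvAdj (f 1 :: (List.range m).map (fun k => f (k + 2))) := rfl
    rw [e4, ← e2]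
    congr 1
    exact ih (fun k => f (k + 1))
lemma pvZipSum (l : List Int) : ∀ (a z w : Int),
    (((a :: l).zip (l ++ [z])).map (fun p => w + pvDig (p.2 - p.1))).sum
      = ((pvDiffs a l z).map (fun d => w + pvDig d)).sum := by
  induction l with
  | nil => intro a z w; simp [pvDiffs]
  | cons b t ih =>
    intro a z w
    simp only [pvDiffs, List.cons_append, List.zip_cons_cons, List.map_cons, List.sum_cons, ih]

lemma pvDiffs_shift (l : List Int) (a z : Int) :
    ∃ h t, pvDiffs (a + 1) l z = h :: t ∧ pvDiffs a l z = (h + 1) :: t := by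
  cases l with
  | nil => exact ⟨z - (a + 1), [], rfl, by simp [pvDiffs]; ring⟩
  | cons b t => exact ⟨b - (a + 1), pvDiffs b t z, rfl, by simp [pvDiffs]; ring⟩

lemma pvBnds_enum (e : List Bool) : ∀ (s : Int),
    (PySem.List.enumerate e s).filterMap (fun p => if p.2 then none else some (p.1 + 1))
      = (pvBnds e).map (· + s) := by
  induction e with
  | nil => intro s; simp [PySem.List.enumerate, pvBnds]
  | cons b t ih =>
    intro s
    rw [PySem.List.enumerate_cons, List.filterMap_cons]
    cases b with
    | true =>
      rw [pvBnds_true]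
      simp [ih (s + 1), List.map_map]
      intro a _
      ring
    | false =>
      rw [pvBnds_false]
      simp [ih (s + 1), List.map_map]
      refine ⟨by ring, fun a _ => by ring⟩

lemma pvRuns_diffs (e : List Bool) : ∀ (a : Int),
    pvDiffs a ((pvBnds e).map (· + a)) (a + e.length + 1) = (pvRuns e).1 :: (pvRuns e).2 := by
  induction e with
  | nil => intro a; simp [pvBnds, pvRuns, pvDiffs]
  | cons b t ih =>
    intro a
    have hmm : ((pvBnds t).map (· + 1)).map (· + a) = (pvBnds t).map (· + (a + 1)) := by
      rw [List.map_map]; apply List.map_congr_left; intro x _; simp [Function.comp]; ring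
    have hlen : a + (t.length + 1 : Nat) + 1 = (a + 1) + t.length + 1 := by push_cast; ring
    cases b with
    | true =>
      rw [pvBnds_true, hmm, List.length_cons, hlen]
      obtain ⟨h, t', h1, h2⟩ := pvDiffs_shift ((pvBnds t).map (· + (a + 1))) a ((a + 1) + t.length + 1)
      rw [ih (a + 1)] at h1
      obtain ⟨rfl, rfl⟩ : (pvRuns t).1 = h ∧ (pvRuns t).2 = t' :=
        ⟨(List.cons.injEq _ _ _ _ ▸ h1).1, (List.cons.injEq _ _ _ _ ▸ h1).2⟩
      rw [h2, pvRuns_true]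
    | false =>
      rw [pvBnds_false, List.length_cons, List.map_cons, pvDiffs, hmm]
      have h1a : (1 : Int) + a - a = 1 := by ring
      have h2a : (1 : Int) + a = a + 1 := by ring
      rw [h1a, h2a, hlen, ih (a + 1), pvRuns_false]

lemma pvChunkEq (l : List Char) (a b k : Nat) :
    (((l.drop a).take k : List Char) == (l.drop b).take k)
      = (List.range k).all (fun t => l[a + t]? == l[b + t]?) := by
  rw [Bool.eq_iff_iff]
  simp only [beq_iff_eq, List.all_eq_true, List.mem_range]
  constructor
  · intro h t ht
    have h1 : ((l.drop a).take k)[t]? = l[a + t]? := by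
      rw [List.getElem?_take_of_lt ht, List.getElem?_drop]
    have h2 : ((l.drop b).take k)[t]? = l[b + t]? := by
      rw [List.getElem?_take_of_lt ht, List.getElem?_drop]
    simp only [← h1, ← h2, h]
  · intro h
    apply List.ext_getElem?
    intro t
    by_cases ht : t < k
    · rw [List.getElem?_take_of_lt ht, List.getElem?_drop, List.getElem?_take_of_lt ht,
        List.getElem?_drop]
      have := h t ht
      simpa using this
    · rw [List.getElem?_take_eq_none (by omega), List.getElem?_take_eq_none (by omega)]

lemma pvRangeStep (nN iN : Nat) (hi : 0 < iN) (hn : 0 < nN) :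
    PySem.List.pyRange 0 (nN : Int) (iN : Int)
      = (List.range ((nN + iN - 1) / iN)).map (fun k => ((k * iN : Nat) : Int)) := by
  rw [PySem.List.pyRange_of_pos 0 (nN : Int) (by exact_mod_cast hi)]
  have hlt : (0 : Int) < (nN : Int) := by exact_mod_cast hn
  rw [if_pos hlt]
  have e1 : ((nN : Int) - 0 + (iN : Int) - 1) = ((nN + iN - 1 : Nat) : Int) := by
    push_cast [Nat.cast_sub (by omega : 1 ≤ nN + iN)]; ring
  rw [e1]
  have e2 : ((nN + iN - 1 : Nat) : Int) / (iN : Int) = (((nN + iN - 1) / iN : Nat) : Int) := by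
    rw [Int.ofNat_ediv_ofNat]
  rw [e2, Int.toNat_natCast]
  apply List.map_congr_left
  intro k _
  push_cast
  ring

lemma pvCeil (nN iN : Nat) (hi : 0 < iN) :
    (nN + iN - 1) / iN = if nN % iN = 0 then nN / iN else nN / iN + 1 := by
  have hdm : iN * (nN / iN) + nN % iN = nN := Nat.div_add_mod nN iN
  have hm : nN % iN < iN := Nat.mod_lt _ hi
  have e1 : nN + iN - 1 = iN * (nN / iN) + (nN % iN + iN - 1) := by omega
  rw [e1, Nat.mul_add_div hi]
  by_cases h0 : nN % iN = 0
  · rw [if_pos h0, h0]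
    have : (0 + iN - 1) / iN = 0 := Nat.div_eq_of_lt (by omega)
    omega
  · rw [if_neg h0]
    have : (nN % iN + iN - 1) / iN = 1 := by
      apply Nat.div_eq_of_lt_le (by omega) (by omega)
    omega

lemma pvBoolF (cs : List Char) (iN k : Nat) :
    ((PySem.List.pyRange ((k : Int) * (iN : Int)) ((k : Int) * (iN : Int) + (iN : Int)) 1).all
        (fun t => PySem.List.pyGet? cs t == PySem.List.pyGet? cs (t + (iN : Int))))
      = ((cs.drop (k * iN)).take iN == (cs.drop ((k + 1) * iN)).take iN) := by
  rw [PySem.List.pyRange_one]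
  have e0 : ((k : Int) * (iN : Int) + (iN : Int) - (k : Int) * (iN : Int)) = (iN : Int) := by ring
  rw [e0, Int.toNat_natCast, List.all_map]
  rw [pvChunkEq cs (k * iN) ((k + 1) * iN) iN]
  congr 1
  funext t
  have ea : (k : Int) * (iN : Int) + (t : Int) = ((k * iN + t : Nat) : Int) := by push_cast; ring
  have eb : ((k * iN + t : Nat) : Int) + (iN : Int) = (((k + 1) * iN + t : Nat) : Int) := by
    push_cast; ring
  simp only [Function.comp, ea, eb, PySem.List.pyGet?_natCast]

-- chunk-list characterisation of the compressed length for one chunk size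
lemma pvClen_chunks (cs : List Char) (iN : Nat) (h1 : 1 ≤ iN) (h2 : 2 * iN ≤ cs.length) :
    pvClen ((List.range ((cs.length + iN - 1) / iN)).map (fun k => (cs.drop (k * iN)).take iN))
      = ((cs.length % iN : Nat) : Int)
        + (((pvRuns (pvAdj ((List.range (cs.length / iN)).map (fun k => (cs.drop (k * iN)).take iN)))).1
            :: (pvRuns (pvAdj ((List.range (cs.length / iN)).map (fun k => (cs.drop (k * iN)).take iN)))).2).map
              (fun d => ((iN : Nat) : Int) + pvDig d)).sum := by
  set nN := cs.length with hnN
  set fullN := nN / iN with hfullN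
  set tailN := nN % iN with htailN
  have hdm : iN * fullN + tailN = nN := Nat.div_add_mod nN iN
  have htlt : tailN < iN := Nat.mod_lt _ (by omega)
  have hfull2 : 2 ≤ fullN := (Nat.le_div_iff_mul_le (by omega)).mpr (by omega)
  have hCw : ∀ z ∈ (List.range fullN).map (fun k => (cs.drop (k * iN)).take iN),
      ((z.length : Nat) : Int) = ((iN : Nat) : Int) := by
    intro z hz
    obtain ⟨k, hk, rfl⟩ := List.mem_map.mp hz
    rw [List.mem_range] at hk
    have hkb : k * iN + iN ≤ nN := by
      have hmul : (k + 1) * iN ≤ fullN * iN := Nat.mul_le_mul_right iN (by omega)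
      have h3 : fullN * iN ≤ nN := by rw [Nat.mul_comm fullN iN]; omega
      have h4 : (k + 1) * iN = k * iN + iN := by ring
      omega
    simp only [List.length_take, List.length_drop]
    congr 1
    omega
  have hne : (List.range fullN).map (fun k => (cs.drop (k * iN)).take iN) ≠ [] := by
    apply List.ne_nil_of_length_pos
    simp only [List.length_map, List.length_range]
    omega
  rw [pvCeil nN iN (by omega)]
  by_cases h0 : tailN = 0
  · rw [if_pos h0, pvClen_runs _ ((iN : Nat) : Int) hne hCw, h0]
    simp
  · rw [if_neg h0, List.range_succ, List.map_append, List.map_singleton]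
    have hlt : (((cs.drop (fullN * iN)).take iN).length : Int) = (tailN : Int) := by
      simp only [List.length_take, List.length_drop]
      congr 1
      rw [Nat.mul_comm fullN iN]
      omega
    rw [pvClen_append_tail _ _ ((iN : Nat) : Int) hne hCw (by rw [hlt]; exact_mod_cast (by omega : tailN ≠ iN)),
      pvClen_runs _ ((iN : Nat) : Int) hne hCw, hlt]
    ring

-- ===== VERDICT (by name: the statement is the Claim_ definition above) =====
theorem solution_spec : Claim_equal_solution := by
  intro s _
  unfold Spec_solution solution solution_alt
  simp only []
  apply PySem.List.foldl_congr_mem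
  intro acc i hi
  rw [PySem.List.mem_pyRange_one] at hi
  have hfd2 : PySem.Int.floordiv ((s.toList.length : Nat) : Int) 2
      = ((s.toList.length / 2 : Nat) : Int) := by
    exact_mod_cast PySem.Int.floordiv_natCast s.toList.length 2
  rw [hfd2] at hi
  obtain ⟨hi1, hi2⟩ := hi
  obtain ⟨iN, rfl⟩ : ∃ iN : Nat, i = (iN : Int) := ⟨i.toNat, (Int.toNat_of_nonneg (by omega)).symm⟩
  have hiN1 : 1 ≤ iN := by exact_mod_cast hi1
  have hiN2 : iN ≤ s.toList.length / 2 := by omega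
  have h2i : 2 * iN ≤ s.toList.length := by
    have := (Nat.le_div_iff_mul_le (by omega : 0 < 2)).mp hiN2
    omega
  have hfull2 : 2 ≤ s.toList.length / iN := (Nat.le_div_iff_mul_le (by omega)).mpr (by omega)
  congr 1
  -- A side: chunk list, then pvClen, then run sums
  rw [pvRangeStep s.toList.length iN (by omega) (by omega), List.map_map]
  have harr : (List.range ((s.toList.length + iN - 1) / iN)).map
      ((fun j => PySem.List.slice s.toList (some j) (some (j + ((iN : Nat) : Int))))
        ∘ (fun k : Nat => ((k * iN : Nat) : Int)))
      = (List.range ((s.toList.length + iN - 1) / iN)).map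
          (fun k => (s.toList.drop (k * iN)).take iN) := by
    apply List.map_congr_left
    intro k _
    simp only [Function.comp]
    exact PySem.List.slice_natCast_add s.toList (k * iN) iN
  rw [harr]
  have hA := pvInner ((List.range ((s.toList.length + iN - 1) / iN)).map
      (fun k => (s.toList.drop (k * iN)).take iN)) (by
    apply List.ne_nil_of_length_pos
    simp only [List.length_map, List.length_range]
    have := (Nat.le_div_iff_mul_le (by omega : 0 < iN)).mpr
      (by omega : 1 * iN ≤ s.toList.length + iN - 1)
    omega)
  unfold pvALen at hA
  rw [hA, pvClen_chunks s.toList iN hiN1 h2i]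
  -- B side
  rw [show PySem.Int.floordiv ((s.toList.length : Nat) : Int) ((iN : Nat) : Int)
      = ((s.toList.length / iN : Nat) : Int) from PySem.Int.floordiv_natCast _ _]
  rw [show PySem.Int.mod ((s.toList.length : Nat) : Int) ((iN : Nat) : Int)
      = ((s.toList.length % iN : Nat) : Int) from PySem.Int.mod_natCast _ _]
  rw [show ((s.toList.length / iN : Nat) : Int) - 1 = ((s.toList.length / iN - 1 : Nat) : Int)
      from by omega]
  rw [PySem.List.pyRange_zero_nat (s.toList.length / iN - 1), List.map_map]
  have heq : (List.range (s.toList.length / iN - 1)).map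
      ((fun j => (PySem.List.pyRange (j * ((iN : Nat) : Int)) (j * ((iN : Nat) : Int) + ((iN : Nat) : Int)) 1).all
          (fun t => PySem.List.pyGet? s.toList t == PySem.List.pyGet? s.toList (t + ((iN : Nat) : Int))))
        ∘ (fun k : Nat => (k : Int)))
      = (List.range (s.toList.length / iN - 1)).map
          (fun k => ((s.toList.drop (k * iN)).take iN == (s.toList.drop ((k + 1) * iN)).take iN)) := by
    apply List.map_congr_left
    intro k _
    simp only [Function.comp]
    exact pvBoolF s.toList iN k
  rw [heq]
  have hadj : pvAdj ((List.range (s.toList.length / iN)).map (fun k => (s.toList.drop (k * iN)).take iN))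
      = (List.range (s.toList.length / iN - 1)).map
          (fun k => ((s.toList.drop (k * iN)).take iN == (s.toList.drop ((k + 1) * iN)).take iN)) := by
    have hf : s.toList.length / iN = (s.toList.length / iN - 1) + 1 := by omega
    conv_lhs => rw [hf]
    exact pvAdj_map_range (s.toList.length / iN - 1) (fun k => (s.toList.drop (k * iN)).take iN)
  rw [← hadj, pvBnds_enum _ 0]
  have hb0 : ∀ l : List Int, l.map (· + 0) = l := by intro l; simp
  rw [hb0]
  rw [show (fun p : Int × Int => ((iN : Nat) : Int) +
        (if p.2 - p.1 > 1 then ((PySem.Int.toChars (p.2 - p.1)).length : Int) else 0))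
      = (fun p : Int × Int => ((iN : Nat) : Int) + pvDig (p.2 - p.1)) from rfl]
  rw [pvZipSum]
  have hrd := pvRuns_diffs (pvAdj ((List.range (s.toList.length / iN)).map
      (fun k => (s.toList.drop (k * iN)).take iN))) 0
  rw [hb0] at hrd
  have hlen : (0 : Int) + ((pvAdj ((List.range (s.toList.length / iN)).map
      (fun k => (s.toList.drop (k * iN)).take iN))).length : Int) + 1
      = ((s.toList.length / iN : Nat) : Int) := by
    rw [hadj]
    simp only [List.length_map, List.length_range]
    omega
  rw [hlen] at hrd
  rw [hrd]
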